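-- pv_equiv track=rewrite | github.com/Everest187/Ripple | addons/title.py | blackwhite
-- ===== SOURCE A (Python) =====
-- def blackwhite(text):
--     faded = ""
--     red = 0; green = 0; blue = 0
--     for line in text.splitlines():
--         faded += (f"\033[38;2;{blue};{green};{red}m{line}\033[0m\n")
--         if not red == 255 and not green == 255 and not blue == 255:
--             red += 20; green += 20; blue += 20
--             if red > 255 and green > 255 and blue > 255:
--                 red = 255; green = 255; blue = 255
--     return faded
-- ===== SOURCE B (Python) =====
-- def blackwhite(text):
--     lines = text.splitlines()
--     # Stage 1: precompute the grayscale palette of ANSI prefixes: the 13-step ramp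
--     # 0,20,...,240, padded with white (255) to cover any remaining lines.
--     palette = [f"\033[38;2;{c};{c};{c}m" for c in range(0, 256, 20)]
--     palette += ["\033[38;2;255;255;255m"] * (len(lines) - len(palette))
--     # Stage 2: pair each line with its precomputed prefix (zip truncates the palette).
--     return "".join(p + line + "\033[0m\n" for p, line in zip(palette, lines))
-- ===== Notes on version B (the rewrite author's own statement) =====
-- stated objective: alternative
-- what changed: Two staged passes with a precomputed palette table: B first builds the 13-step grayscale ramp of ANSI prefixes padded with white, then zips it against the lines and joins, instead of A's single pass that mutates red/green/blue counters with an increment-and-clamp conditional per line.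
import Mathlib
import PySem

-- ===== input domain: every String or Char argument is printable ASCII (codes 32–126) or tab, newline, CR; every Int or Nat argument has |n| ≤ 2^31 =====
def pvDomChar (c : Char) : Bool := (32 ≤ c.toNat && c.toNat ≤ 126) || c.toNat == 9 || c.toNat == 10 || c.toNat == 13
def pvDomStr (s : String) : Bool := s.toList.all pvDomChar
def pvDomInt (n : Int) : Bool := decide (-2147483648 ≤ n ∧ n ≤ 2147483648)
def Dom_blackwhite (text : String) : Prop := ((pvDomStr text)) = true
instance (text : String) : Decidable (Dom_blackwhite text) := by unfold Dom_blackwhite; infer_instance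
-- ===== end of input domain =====

-- B replaces A's single pass with mutating increment-and-clamp color counters by two staged
-- passes: precompute a palette table of ANSI prefixes (13-step ramp padded with white), then
-- zip it with the lines and join (same return value; same cost).

-- ===== PORT A =====
-- the f-string body of A's loop: "\033[38;2;{blue};{green};{red}m{line}\033[0m\n"
def bwLineA (red green blue : Int) (line : String) : List Char :=
  "\x1b[38;2;".toList ++ PySem.Int.toChars blue ++ ";".toList ++ PySem.Int.toChars green
    ++ ";".toList ++ PySem.Int.toChars red ++ "m".toList ++ line.toList ++ "\x1b[0m\n".toList

-- A's loop over splitlines with state (faded, red, green, blue)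
def bwGoA : List String → List Char → Int → Int → Int → List Char
  | [], faded, _, _, _ => faded
  | line :: rest, faded, red, green, blue =>
    let faded := faded ++ bwLineA red green blue line
    if ¬(red = 255) ∧ ¬(green = 255) ∧ ¬(blue = 255) then
      let red := red + 20; let green := green + 20; let blue := blue + 20
      if red > 255 ∧ green > 255 ∧ blue > 255 then
        bwGoA rest faded 255 255 255
      else
        bwGoA rest faded red green blue
    else
      bwGoA rest faded red green blue

def blackwhite (text : String) : String :=
  String.mk (bwGoA (PySem.Str.splitlines text) [] 0 0 0)

-- ===== PORT B =====
-- B's palette entry: f"\033[38;2;{c};{c};{c}m"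
def bwPrefix (c : Int) : List Char :=
  "\x1b[38;2;".toList ++ PySem.Int.toChars c ++ ";".toList ++ PySem.Int.toChars c
    ++ ";".toList ++ PySem.Int.toChars c ++ "m".toList

-- the literal padding entry "\033[38;2;255;255;255m" and the literal suffix "\033[0m\n"
def bwWhite : List Char := "\x1b[38;2;255;255;255m".toList
def bwReset : List Char := "\x1b[0m\n".toList

-- stage 1, first part: [f"\033[38;2;{c};{c};{c}m" for c in range(0, 256, 20)]
def bwBase : List (List Char) := (PySem.List.pyRange 0 256 20).map bwPrefix

def blackwhite_alt (text : String) : String :=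
  let lines := PySem.Str.splitlines text
  -- stage 1: palette = ramp + white padding ([x]*(negative) = [] matches Nat subtraction)
  let palette := bwBase ++ List.replicate (lines.length - bwBase.length) bwWhite
  -- stage 2: zip palette with lines (zip truncates) and join the formatted pieces
  String.mk (PySem.Chars.join []
    ((palette.zip lines).map (fun p => p.1 ++ p.2.toList ++ bwReset)))

-- ===== PRECONDITION & SPEC =====
def Spec_blackwhite (text : String) (out : String) : Prop := out = blackwhite_alt text
instance (text : String) (out : String) : Decidable (Spec_blackwhite text out) := by unfold Spec_blackwhite; infer_instance

-- ===== CLAIM (what is proved, stated in full; the proofs are below) =====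
def Claim_equal_blackwhite : Prop := ∀ (text : String), Dom_blackwhite text → Spec_blackwhite text (blackwhite text)

-- ===== LEMMAS AND PROOFS =====

-- the palette suffix seen after i lines have been emitted, for m remaining lines
def palFrom (i m : Nat) : List (List Char) :=
  bwBase.drop i ++ List.replicate (min ((m + i) - 13) m) bwWhite

theorem bw_join_nil_cons (x : List Char) (xs : List (List Char)) :
    PySem.Chars.join [] (x :: xs) = x ++ PySem.Chars.join [] xs := by
  cases xs with
  | nil => simp [PySem.Chars.join, List.intercalate]
  | cons y ys => simp [PySem.Chars.join_cons_cons]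

theorem bwRange_eval :
    PySem.List.pyRange 0 256 20 = [0, 20, 40, 60, 80, 100, 120, 140, 160, 180, 200, 220, 240] := by
  decide

theorem bwBase_length : bwBase.length = 13 := by
  simp [bwBase, bwRange_eval]

theorem bwWhite_eq : bwWhite = bwPrefix 255 := by decide

theorem palFrom_cons_lt (i m : Nat) (h : i < 13) :
    palFrom i (m + 1) = bwPrefix (20 * i) :: palFrom (i + 1) m := by
  unfold palFrom
  have hlen : i < bwBase.length := by rw [bwBase_length]; exact h
  rw [List.drop_eq_getElem_cons hlen]
  have hget : bwBase[i] = bwPrefix (20 * i) := by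
    interval_cases i <;> simp [bwBase, bwRange_eval]
  rw [hget]
  have : min ((m + 1 + i) - 13) (m + 1) = min ((m + (i + 1)) - 13) m := by omega
  rw [this]
  rfl

theorem palFrom_cons_ge (i m : Nat) (h : 13 ≤ i) :
    palFrom i (m + 1) = bwWhite :: palFrom (i + 1) m := by
  unfold palFrom
  have hdrop : ∀ j, 13 ≤ j → bwBase.drop j = [] :=
    fun j hj => List.drop_of_length_le (by rw [bwBase_length]; exact hj)
  rw [hdrop i h, hdrop (i + 1) (by omega)]
  have h1 : min ((m + 1 + i) - 13) (m + 1) = (min ((m + (i + 1)) - 13) m) + 1 := by omega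
  rw [h1, List.replicate_succ]
  rfl

theorem bwLineA_eq_piece (c : Int) (line : String) :
    bwLineA c c c line = bwPrefix c ++ line.toList ++ bwReset := by
  simp [bwLineA, bwPrefix, bwReset]

-- loop invariant: with all three counters equal to min(20*i, 255), A's loop produces
-- acc ++ the join of the pieces B builds from the palette suffix palFrom i
theorem bwGoA_eq (lines : List String) (i : Nat) (acc : List Char) :
    bwGoA lines acc (min (20 * (i : Int)) 255) (min (20 * (i : Int)) 255) (min (20 * (i : Int)) 255)
      = acc ++ PySem.Chars.join []
          (((palFrom i lines.length).zip lines).map (fun p => p.1 ++ p.2.toList ++ bwReset)) := by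
  induction lines generalizing i acc with
  | nil => simp [bwGoA, PySem.Chars.join, List.intercalate]
  | cons line rest ih =>
    have hcons : (palFrom i (rest.length + 1)).zip (line :: rest)
        = (if i < 13 then bwPrefix (20 * i) else bwWhite, line) :: (palFrom (i + 1) rest.length).zip rest := by
      by_cases h : i < 13
      · rw [palFrom_cons_lt i rest.length h]; simp [h]
      · rw [palFrom_cons_ge i rest.length (by omega)]; simp [h]
    rw [List.length_cons, hcons, List.map_cons, bw_join_nil_cons, bwGoA]
    simp only [bwLineA_eq_piece]
    have hicast : (0 : Int) ≤ (i : Int) := Int.natCast_nonneg i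
    by_cases h : i < 13
    · -- ramp region: counter is 20*i ≤ 240
      have hle : (i : Int) ≤ 12 := by exact_mod_cast Nat.lt_succ_iff.mp h
      have hc : min (20 * (i : Int)) 255 = 20 * (i : Int) := by omega
      rw [if_pos h, hc]
      rw [if_pos (by constructor <;> [omega; constructor <;> omega])]
      by_cases h2 : 20 * (i : Int) + 20 > 255
      · -- i = 12: clamp to 255 = min(20*13,255)
        rw [if_pos ⟨h2, h2, h2⟩]
        have h3 : (255 : Int) = min (20 * ((i : Int) + 1)) 255 := by omega
        rw [show acc ++ ((bwPrefix (20 * (i:Int)) ++ line.toList ++ bwReset) ++ _)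
              = (acc ++ (bwPrefix (20 * (i:Int)) ++ line.toList ++ bwReset)) ++ _ from
            (List.append_assoc _ _ _).symm]
        rw [h3, show ((i : Int) + 1) = ((i + 1 : Nat) : Int) by push_cast; ring, ih (i + 1)]
      · rw [if_neg (by simpa using h2)]
        have h3 : 20 * (i : Int) + 20 = min (20 * ((i + 1 : Nat) : Int)) 255 := by
          push_cast; omega
        rw [show acc ++ ((bwPrefix (20 * (i:Int)) ++ line.toList ++ bwReset) ++ _)
              = (acc ++ (bwPrefix (20 * (i:Int)) ++ line.toList ++ bwReset)) ++ _ from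
            (List.append_assoc _ _ _).symm]
        rw [h3, ih (i + 1)]
    · -- saturated region: counter is 255 and stays 255
      have hge : (13 : Int) ≤ (i : Int) := by exact_mod_cast Nat.le_of_not_lt h
      have hc : min (20 * (i : Int)) 255 = 255 := by omega
      rw [if_neg h, hc, bwWhite_eq]
      rw [if_neg (by simp)]
      have h3 : (255 : Int) = min (20 * ((i + 1 : Nat) : Int)) 255 := by push_cast; omega
      rw [show acc ++ ((bwPrefix 255 ++ line.toList ++ bwReset) ++ _)
            = (acc ++ (bwPrefix 255 ++ line.toList ++ bwReset)) ++ _ from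
          (List.append_assoc _ _ _).symm]
      rw [show (255 : Int) = min (20 * ((i + 1 : Nat) : Int)) 255 from h3, ih (i + 1)]

-- ===== VERDICT (by name: the statement is the Claim_ definition above) =====
theorem blackwhite_spec : Claim_equal_blackwhite := by
  intro text _
  unfold Spec_blackwhite blackwhite blackwhite_alt
  have hpal : bwBase ++ List.replicate ((PySem.Str.splitlines text).length - bwBase.length) bwWhite
      = palFrom 0 (PySem.Str.splitlines text).length := by
    unfold palFrom
    rw [bwBase_length, List.drop_zero]
    have : min (((PySem.Str.splitlines text).length + 0) - 13) (PySem.Str.splitlines text).length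
        = (PySem.Str.splitlines text).length - 13 := by omega
    rw [this]
  have h := bwGoA_eq (PySem.Str.splitlines text) 0 []
  norm_num at h
  simp only [hpal, h, List.append_assoc]
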